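-- pv_equiv track=rewrite | github.com/Palani-SN/py4cli | SRCS/py4cli/moderate.py | _parse_inps
-- ===== SOURCE A (Python) =====
-- from collections import OrderedDict
--
-- def _parse_inps(inps):
--
--     inp_args = inps[1:]
--     head = 0
--     code_flow = OrderedDict()
--     for i in range(len(inp_args)+1):
--         if (i == len(inp_args)) or (head != i and inp_args[i].startswith("~")):
--             func_name = inp_args[head][1:]
--             func_args = inp_args[(head+1):i]
--             code_flow[func_name] = func_args
--             head = i
--
--     return code_flow
-- ===== SOURCE B (Python) =====
-- from collections import OrderedDict
--
-- def _parse_inps(inps):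
--     # Two-phase: compute segment boundary indices first, then slice between
--     # consecutive boundaries. (Returns an empty OrderedDict when there are no
--     # arguments, where the original raises IndexError.)
--     args = inps[1:]
--     bounds = [i for i in range(len(args)) if i == 0 or args[i].startswith("~")]
--     bounds.append(len(args))
--     flow = OrderedDict()
--     for a, b in zip(bounds, bounds[1:]):
--         flow[args[a][1:]] = args[a + 1:b]
--     return flow
-- ===== Notes on version B (the rewrite author's own statement) =====
-- stated objective: alternative
-- what changed: Replaces A's single fused scan with a mutable head pointer and flush-on-boundary state machine by a two-phase pass: first collect all segment boundary indices, then slice the argument list between consecutive boundary pairs.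
import Mathlib
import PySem

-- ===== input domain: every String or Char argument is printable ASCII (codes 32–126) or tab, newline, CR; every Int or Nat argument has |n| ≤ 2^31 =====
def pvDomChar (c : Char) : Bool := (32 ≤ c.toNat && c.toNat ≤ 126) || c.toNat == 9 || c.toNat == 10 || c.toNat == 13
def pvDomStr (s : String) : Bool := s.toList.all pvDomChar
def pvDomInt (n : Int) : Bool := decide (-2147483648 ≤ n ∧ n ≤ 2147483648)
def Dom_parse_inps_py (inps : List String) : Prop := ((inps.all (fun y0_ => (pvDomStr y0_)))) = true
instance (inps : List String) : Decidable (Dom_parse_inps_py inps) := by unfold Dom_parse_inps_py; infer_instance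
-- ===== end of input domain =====

-- B replaces A's fused scan (mutable head + flush-on-boundary) by a two-phase pass:
-- compute all boundary indices first, then slice between consecutive boundaries;
-- Pre_ excludes exactly the inputs with no CLI arguments (len(inps) <= 1), where A
-- raises IndexError.


-- ===== PORT A =====
-- loop body of A's single fused scan: state = (head, code_flow)
def pvStepA (args : List String) (n : Int)
    (st : Int × PySem.Dict String (List String)) (i : Int) :
    Int × PySem.Dict String (List String) :=
  if i = n ∨ (st.1 ≠ i ∧ PySem.Str.startswith (PySem.List.pyGetD args i "") "~") then
    (i, (st.2).insert (PySem.Str.slice (PySem.List.pyGetD args st.1 "") (some 1) none)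
          (PySem.List.slice args (some (st.1 + 1)) (some i)))
  else st

def parse_inps_py (inps : List String) : List (String × List String) :=
  let inp_args := PySem.List.slice inps (some 1) none
  let n : Int := (inp_args.length : Int)
  let st := (PySem.List.pyRange 0 (n + 1) 1).foldl (pvStepA inp_args n)
    (0, PySem.Dict.empty)
  st.2.items

-- ===== PORT B =====
-- body of B's second phase: insert the slice between one pair of consecutive boundaries
def pvInsB (args : List String) (d : PySem.Dict String (List String)) (p : Int × Int) :
    PySem.Dict String (List String) :=
  d.insert (PySem.Str.slice (PySem.List.pyGetD args p.1 "") (some 1) none)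
    (PySem.List.slice args (some (p.1 + 1)) (some p.2))

def parse_inps_py_alt (inps : List String) : List (String × List String) :=
  let args := PySem.List.slice inps (some 1) none
  let n : Int := (args.length : Int)
  let bounds := ((PySem.List.pyRange 0 n 1).filter
      (fun i => i == 0 || PySem.Str.startswith (PySem.List.pyGetD args i "") "~")) ++ [n]
  let flow := (bounds.zip bounds.tail).foldl (pvInsB args) PySem.Dict.empty
  flow.items

-- ===== PRECONDITION & SPEC =====
-- A raises IndexError iff inps has no CLI arguments (len(inps) <= 1); Pre_ excludes exactly those.
def Pre_parse_inps_py (inps : List String) : Prop := 2 ≤ inps.length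
instance (inps : List String) : Decidable (Pre_parse_inps_py inps) := by
  unfold Pre_parse_inps_py; infer_instance

def pvWitness_parse_inps_py : List String := ["prog", "~f", "x", "~g"]

def Spec_parse_inps_py (inps : List String) (out : List (String × List String)) : Prop :=
  out = parse_inps_py_alt inps
instance (inps : List String) (out : List (String × List String)) :
    Decidable (Spec_parse_inps_py inps out) := by unfold Spec_parse_inps_py; infer_instance

-- ===== CLAIM (what is proved, stated in full; the proofs are below) =====
def Claim_equal_parse_inps_py : Prop := ∀ (inps : List String), Dom_parse_inps_py inps →
  Pre_parse_inps_py inps → Spec_parse_inps_py inps (parse_inps_py inps)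

-- ===== LEMMAS AND PROOFS =====

-- the boundary predicate tested by both programs on indices ≥ 1
def pvP (args : List String) (i : Int) : Bool :=
  PySem.Str.startswith (PySem.List.pyGetD args i "") "~"

-- Bridge: A's fused scan over idxs ++ [n], started at head h, equals B's fold of the
-- insert step over consecutive pairs of h :: (boundaries of idxs) ++ [n].
theorem pvBridge (args : List String) (idxs : List Int) (h : Int)
    (d : PySem.Dict String (List String))
    (hmem : ∀ x ∈ idxs, h < x ∧ x < (args.length : Int))
    (hp : idxs.Pairwise (· < ·)) :
    ((idxs ++ [(args.length : Int)]).foldl (pvStepA args (args.length : Int)) (h, d)).2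
      = (((h :: (idxs.filter (pvP args) ++ [(args.length : Int)])).zip
            (idxs.filter (pvP args) ++ [(args.length : Int)])).foldl (pvInsB args) d) := by
  induction idxs generalizing h d with
  | nil =>
      simp [pvStepA, pvInsB]
  | cons i rest ih =>
      obtain ⟨hhi, hin⟩ := hmem i (List.mem_cons_self ..)
      have hrest : ∀ x ∈ rest, h < x ∧ x < (args.length : Int) := fun x hx => hmem x (List.mem_cons_of_mem _ hx)
      have hpr : rest.Pairwise (· < ·) := hp.of_cons
      have hlt : ∀ x ∈ rest, i < x := fun x hx => (List.pairwise_cons.mp hp).1 x hx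
      by_cases hP : pvP args i = true
      · have hstep : pvStepA args (args.length : Int) (h, d) i
            = (i, pvInsB args d (h, i)) := by
          unfold pvStepA pvInsB
          rw [if_pos (Or.inr ⟨by simp; omega, by simpa [pvP] using hP⟩)]
        simp only [List.cons_append, List.foldl_cons, hstep, List.filter_cons, hP, if_pos]
        rw [ih i (pvInsB args d (h, i))
          (fun x hx => ⟨hlt x hx, (hrest x hx).2⟩) hpr]
        simp [List.zip]
      · have hstep : pvStepA args (args.length : Int) (h, d) i = (h, d) := by
          unfold pvStepA
          rw [if_neg (by push Not; exact ⟨by omega, fun _ => by simpa [pvP] using hP⟩)]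
        simp only [List.cons_append, List.foldl_cons, hstep, List.filter_cons, hP]
        exact ih h d (fun x hx => ⟨lt_trans hhi (hlt x hx), (hrest x hx).2⟩) hpr

-- ===== VERDICT (by name: the statement is the Claim_ definition above) =====
theorem parse_inps_py_spec : Claim_equal_parse_inps_py := by
  intro inps _ hpre
  unfold Spec_parse_inps_py parse_inps_py parse_inps_py_alt
  simp only []
  set args := PySem.List.slice inps (some 1) none with hargs
  have hlen : 1 ≤ args.length := by
    rw [hargs, PySem.List.slice_from_one]
    unfold Pre_parse_inps_py at hpre
    simp only [List.length_tail]
    omega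
  set n : Int := (args.length : Int) with hn
  have hn1 : (0 : Int) < n := by omega
  -- A side: peel index 0 (a no-op) and split off the final index n
  have hrange : PySem.List.pyRange 0 (n + 1) 1
      = 0 :: (PySem.List.pyRange 1 n 1 ++ [n]) := by
    rw [PySem.List.pyRange_one_cons (by omega), ← PySem.List.pyRange_one_succ_right (by omega)]
    norm_num
  have hstep0 : pvStepA args n (0, PySem.Dict.empty) 0 = (0, PySem.Dict.empty) := by
    simp [pvStepA]
    omega
  rw [hrange]
  simp only [List.foldl_cons, hstep0]
  rw [pvBridge args (PySem.List.pyRange 1 n 1) 0 PySem.Dict.empty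
    (fun x hx => by
      have := (PySem.List.mem_pyRange_one).mp hx
      exact ⟨by omega, by omega⟩)
    (PySem.List.pairwise_lt_pyRange_one 1 n)]
  -- B side: bounds = 0 :: filter pvP (pyRange 1 n 1) ++ [n]
  have hbounds : (PySem.List.pyRange 0 n 1).filter
      (fun i => i == 0 || PySem.Str.startswith (PySem.List.pyGetD args i "") "~")
      = 0 :: (PySem.List.pyRange 1 n 1).filter (pvP args) := by
    rw [PySem.List.pyRange_one_cons hn1]
    simp only [List.filter_cons, BEq.rfl, Bool.true_or, if_pos]
    congr 1
    apply List.filter_congr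
    intro x hx
    have := (PySem.List.mem_pyRange_one).mp hx
    have hx0 : (x == (0:Int)) = false := by
      simp only [beq_eq_false_iff_ne]; omega
    simp [hx0, pvP]
  rw [hbounds, ← hn]
  simp only [List.cons_append, List.tail_cons]
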